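-- pv_equiv track=rewrite | github.com/copasi/basico | basico/model_info.py | _ends_in_start_e_notation
-- ===== SOURCE A (Python) =====
-- def _ends_in_start_e_notation(text):
--     # go through the string from reverse and check if it ends <number>e|E<space>
--     num_chars = len(text)
--     i = num_chars - 1
--     found_e = False
--     had_numbers = False
--     while i >= 0:
--         cur_char = text[i]
--         if cur_char in 'eE':
--             if found_e:
--                 return False
--             found_e = True
--             i -= 1
--             continue
--
--         if not found_e and cur_char == ' ':
--             i -= 1
--             continue
--
--         if found_e and had_numbers and cur_char == ' ':
--             return True
--
--         if not cur_char.isdigit():  # not a number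
--             if cur_char == '.':
--                 i-=1
--                 continue
--             return False
--
--         had_numbers = True
--         i -= 1
--     return had_numbers and found_e
-- ===== SOURCE B (Python) =====
-- def _ends_in_start_e_notation(text):
--     # decompose the reversed string into exponent / 'e' / mantissa-token and check each part
--     r = text[::-1]
--     k = 0
--     while k < len(r) and (r[k].isdigit() or r[k] == '.' or r[k] == ' '):
--         k += 1
--     if k == len(r) or r[k] not in 'eE':
--         return False
--     exp = r[:k]
--     mant = r[k + 1:]
--     ml = 0
--     while ml < len(mant) and mant[ml] != ' ':
--         ml += 1
--     m = mant[:ml]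
--     if not all(c.isdigit() or c == '.' for c in m):
--         return False
--     return any(c.isdigit() for c in exp) or any(c.isdigit() for c in m)
-- ===== Notes on version B (the rewrite author's own statement) =====
-- stated objective: alternative
-- what changed: A's single right-to-left state machine with two mutable flags and early returns is replaced by a decomposition: reverse the string, split it into exponent segment / 'e' / mantissa token with two takeWhile-style scans, then decide with pure all/any checks on the segments.
import Mathlib
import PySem

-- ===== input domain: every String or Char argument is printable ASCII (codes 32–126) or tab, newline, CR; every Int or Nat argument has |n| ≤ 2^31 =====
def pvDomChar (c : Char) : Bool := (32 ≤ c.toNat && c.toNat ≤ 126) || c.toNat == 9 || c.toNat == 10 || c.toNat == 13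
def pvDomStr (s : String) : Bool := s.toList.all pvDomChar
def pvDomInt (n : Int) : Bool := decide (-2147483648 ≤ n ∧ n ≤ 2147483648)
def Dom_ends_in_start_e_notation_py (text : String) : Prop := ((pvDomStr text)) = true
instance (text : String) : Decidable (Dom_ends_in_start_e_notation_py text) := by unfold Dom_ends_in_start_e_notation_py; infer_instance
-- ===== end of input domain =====

-- B replaces A's right-to-left flag state machine by a reverse + segment decomposition with pure all/any checks (alternative, same cost).

-- ===== PORT A =====
-- A's while loop runs i from len(text)-1 down to 0 reading text[i]; it is transcribed as
-- structural recursion over the reversed character list: same characters in the same order,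
-- same two Boolean state variables, branches in the same order.
def pvALoop : List Char → Bool → Bool → Bool
  | [], found_e, had_numbers => had_numbers && found_e
  | c :: rest, found_e, had_numbers =>
    if c == 'e' || c == 'E' then          -- cur_char in 'eE'
      if found_e then false else pvALoop rest true had_numbers
    else if !found_e && c == ' ' then pvALoop rest found_e had_numbers
    else if found_e && had_numbers && c == ' ' then true
    else if !(PySem.Chars.isdigit c) then
      if c == '.' then pvALoop rest found_e had_numbers else false
    else pvALoop rest found_e true

def ends_in_start_e_notation_py (text : String) : Bool :=
  pvALoop text.toList.reverse false false

-- ===== PORT B =====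
-- port of Source B's first while loop: number of leading chars of r that are digit/'.'/' '
def pvScanExp : List Char → Nat
  | [] => 0
  | c :: rest =>
    if PySem.Chars.isdigit c || c == '.' || c == ' ' then pvScanExp rest + 1 else 0

-- port of Source B's second while loop: number of leading chars of mant that are not ' '
def pvScanTok : List Char → Nat
  | [] => 0
  | c :: rest => if c == ' ' then 0 else pvScanTok rest + 1

def ends_in_start_e_notation_py_alt (text : String) : Bool :=
  let r := text.toList.reverse                      -- r = text[::-1]
  let k := pvScanExp r
  if k = r.length then false
  else
    match r[k]? with                                 -- r[k]; k < len(r) here, so the index is in range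
    | none => false
    | some c =>
      if !(c == 'e' || c == 'E') then false          -- r[k] not in 'eE'
      else
        let exp := PySem.List.slice r none (some (k : Int))         -- r[:k]
        let mant := PySem.List.slice r (some ((k : Int) + 1)) none  -- r[k+1:]
        let ml := pvScanTok mant
        let m := PySem.List.slice mant none (some (ml : Int))       -- mant[:ml]
        if !(m.all fun c => PySem.Chars.isdigit c || c == '.') then false
        else (exp.any PySem.Chars.isdigit || m.any PySem.Chars.isdigit)

-- ===== PRECONDITION & SPEC =====
def Spec_ends_in_start_e_notation_py (text : String) (out : Bool) : Prop := out = ends_in_start_e_notation_py_alt text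
instance (text : String) (out : Bool) : Decidable (Spec_ends_in_start_e_notation_py text out) := by unfold Spec_ends_in_start_e_notation_py; infer_instance

-- ===== CLAIM (what is proved, stated in full; the proofs are below) =====
def Claim_equal_ends_in_start_e_notation_py : Prop := ∀ (text : String), Dom_ends_in_start_e_notation_py text → Spec_ends_in_start_e_notation_py text (ends_in_start_e_notation_py text)

-- ===== LEMMAS AND PROOFS =====
-- the two character classes of the scans
def pvG1 (c : Char) : Bool := PySem.Chars.isdigit c || c == '.' || c == ' '
def pvG2 (c : Char) : Bool := PySem.Chars.isdigit c || c == '.'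

theorem pvDigit_ne {c d : Char} (h : PySem.Chars.isdigit c = true)
    (hd : PySem.Chars.isdigit d = false) : (c == d) = false := by
  cases hc : (c == d) with
  | false => rfl
  | true => rw [beq_iff_eq] at hc; subst hc; rw [h] at hd; cases hd

theorem pvG2_ne_space {c : Char} (h : pvG2 c = true) : (c == ' ') = false := by
  unfold pvG2 at h
  rcases Bool.or_eq_true_iff.mp h with h' | h'
  · cases hc : (c == ' ') with
    | false => rfl
    | true => rw [beq_iff_eq] at hc; subst hc; simp [PySem.Chars.isdigit] at h'
  · rw [beq_iff_eq] at h'; subst h'; rfl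

theorem pvScanExp_eq (r : List Char) : pvScanExp r = (r.takeWhile pvG1).length := by
  induction r with
  | nil => rfl
  | cons c rest ih =>
    by_cases h : (PySem.Chars.isdigit c || c == '.' || c == ' ') = true
    · simp [pvScanExp, List.takeWhile_cons, pvG1, h, ih]
    · simp [pvScanExp, List.takeWhile_cons, pvG1, h, ih]

theorem pvScanTok_eq (l : List Char) : pvScanTok l = (l.takeWhile (fun c => !(c == ' '))).length := by
  induction l with
  | nil => rfl
  | cons c rest ih =>
    by_cases h : (c == ' ') = true
    · simp [pvScanTok, List.takeWhile_cons, h, ih]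
    · simp [pvScanTok, List.takeWhile_cons, h, ih]

theorem pv_take_len_takeWhile {α : Type} (p : α → Bool) (l : List α) :
    l.take (l.takeWhile p).length = l.takeWhile p := by
  induction l with
  | nil => rfl
  | cons c rest ih => by_cases h : p c = true <;> simp [List.takeWhile_cons, h, ih]

-- phase-1 characterisation of A's loop (found_e = false)
theorem pvALoop_phase1 (r : List Char) (hn : Bool) :
    pvALoop r false hn =
      (match r.dropWhile pvG1 with
       | [] => false
       | c :: rest =>
         if c == 'e' || c == 'E' then
           pvALoop rest true (hn || (r.takeWhile pvG1).any PySem.Chars.isdigit)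
         else false) := by
  induction r generalizing hn with
  | nil => simp [pvALoop]
  | cons c rest ih =>
    by_cases he : (c == 'e' || c == 'E') = true
    · have hg : pvG1 c = false := by
        rcases Bool.or_eq_true_iff.mp he with h | h <;>
          (rw [beq_iff_eq] at h; subst h; decide)
      simp [pvALoop, he, List.dropWhile_cons, List.takeWhile_cons, hg]
    · by_cases hd : PySem.Chars.isdigit c = true
      · have hs : (c == ' ') = false := pvDigit_ne hd (by decide)
        have hg : pvG1 c = true := by simp [pvG1, hd]
        rw [Bool.not_eq_true] at he
        simp only [pvALoop, he, hs, hd, Bool.false_or, Bool.and_false, Bool.false_and,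
          Bool.not_true, Bool.false_eq_true, if_false, ite_false, Bool.true_and,
          Bool.and_true, Bool.not_false, if_true, ite_true]
        rw [ih]
        simp only [List.dropWhile_cons, List.takeWhile_cons, hg, if_pos, List.any_cons, hd,
          Bool.true_or, Bool.or_true, ite_true]
      · by_cases hp : (c == '.') = true
        · have hg : pvG1 c = true := by simp [pvG1, hp]
          rw [beq_iff_eq] at hp; subst hp
          rw [Bool.not_eq_true] at he hd
          simp only [pvALoop, he, hd, Bool.false_or, Bool.false_and, Bool.not_false,
            Bool.false_eq_true, if_false, ite_false, if_true, ite_true, Bool.and_false,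
            Bool.true_and, Bool.not_true, show (('.' : Char) == ' ') = false by decide,
            show PySem.Chars.isdigit '.' = false by decide]
          rw [ih]
          simp [List.dropWhile_cons, List.takeWhile_cons, hg,
            show PySem.Chars.isdigit '.' = false by decide]
        · by_cases hs : (c == ' ') = true
          · have hg : pvG1 c = true := by simp [pvG1, hs]
            rw [beq_iff_eq] at hs; subst hs
            rw [Bool.not_eq_true] at he hd
            simp only [pvALoop, he, hd, Bool.false_eq_true, if_false, ite_false,
              Bool.not_false, Bool.true_and, Bool.and_true, if_true, ite_true,
              Bool.false_and, Bool.and_false]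
            rw [ih]
            simp [List.dropWhile_cons, List.takeWhile_cons, hg,
              show PySem.Chars.isdigit ' ' = false by decide]
          · have hg : pvG1 c = false := by simp [pvG1, hd, hp, hs]
            rw [Bool.not_eq_true] at he hd
            simp [pvALoop, he, hd, hp, hs, List.dropWhile_cons, hg]

-- phase-2 characterisation of A's loop (found_e = true)
theorem pvALoop_phase2 (post : List Char) (hn : Bool) :
    pvALoop post true hn =
      (match post.dropWhile pvG2 with
       | [] => hn || (post.takeWhile pvG2).any PySem.Chars.isdigit
       | c :: _ =>
         if c == ' ' then hn || (post.takeWhile pvG2).any PySem.Chars.isdigit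
         else false) := by
  induction post generalizing hn with
  | nil => simp [pvALoop]
  | cons c rest ih =>
    by_cases hd : PySem.Chars.isdigit c = true
    · have he : (c == 'e') = false := pvDigit_ne hd (by decide)
      have hE : (c == 'E') = false := pvDigit_ne hd (by decide)
      have hs : (c == ' ') = false := pvDigit_ne hd (by decide)
      have hg : pvG2 c = true := by simp [pvG2, hd]
      have h1 : pvALoop (c :: rest) true hn = pvALoop rest true true := by
        simp [pvALoop, he, hE, hs, hd]
      rw [h1, ih]
      simp only [List.dropWhile_cons, List.takeWhile_cons, hg, List.any_cons, hd,
        Bool.true_or, Bool.or_true, ite_true, if_pos]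
    · rw [Bool.not_eq_true] at hd
      by_cases hp : (c == '.') = true
      · have hg : pvG2 c = true := by simp [pvG2, hp]
        have h1 : pvALoop (c :: rest) true hn = pvALoop rest true hn := by
          rw [beq_iff_eq] at hp; subst hp
          simp [pvALoop, show PySem.Chars.isdigit '.' = false from by decide]
        rw [h1, ih]
        simp only [List.dropWhile_cons, List.takeWhile_cons, hg, List.any_cons, hd,
          Bool.false_or, ite_true, if_pos]
      · rw [Bool.not_eq_true] at hp
        have hg : pvG2 c = false := by simp [pvG2, hd, hp]
        by_cases hs : (c == ' ') = true
        · have h1 : pvALoop (c :: rest) true hn = hn := by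
            rw [beq_iff_eq] at hs; subst hs; cases hn <;> simp [pvALoop, hd]
          rw [h1]
          simp [List.dropWhile_cons, List.takeWhile_cons, hg, hs]
        · rw [Bool.not_eq_true] at hs
          have h1 : pvALoop (c :: rest) true hn = false := by
            by_cases he : (c == 'e' || c == 'E') = true
            · simp [pvALoop, he]
            · rw [Bool.not_eq_true] at he
              simp [pvALoop, he, hs, hd, hp]
          rw [h1]
          simp [List.dropWhile_cons, hg, hs]

-- phase 2 equals B's mantissa-token check
theorem pvALoop_phase2_token (post : List Char) (hn : Bool) :
    pvALoop post true hn =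
      (let m := post.takeWhile (fun c => !(c == ' '));
       if !(m.all pvG2) then false else hn || m.any PySem.Chars.isdigit) := by
  rw [pvALoop_phase2]
  cases hdw : post.dropWhile pvG2 with
  | nil =>
    have hall : ∀ x ∈ post, pvG2 x = true := List.dropWhile_eq_nil_iff.mp hdw
    have htw : post.takeWhile pvG2 = post := List.takeWhile_eq_self_iff.mpr hall
    have hm : post.takeWhile (fun c => !(c == ' ')) = post :=
      List.takeWhile_eq_self_iff.mpr (fun x hx => by rw [pvG2_ne_space (hall x hx)]; rfl)
    have hallb : post.all pvG2 = true := List.all_eq_true.mpr hall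
    simp [htw, hm, hallb]
  | cons c t =>
    have hc2 : pvG2 c = false := by
      have w : post.dropWhile pvG2 ≠ [] := by rw [hdw]; simp
      have hh := List.head_dropWhile_not pvG2 w
      simp only [hdw, List.head_cons] at hh
      exact hh
    have hsplit : post.takeWhile pvG2 ++ c :: t = post := by
      rw [← hdw]; exact List.takeWhile_append_dropWhile
    have hseg : ∀ x ∈ post.takeWhile pvG2, pvG2 x = true := fun x hx => List.mem_takeWhile_imp hx
    have hns : (post.takeWhile pvG2).takeWhile (fun c => !(c == ' ')) = post.takeWhile pvG2 :=
      List.takeWhile_eq_self_iff.mpr (fun x hx => by rw [pvG2_ne_space (hseg x hx)]; rfl)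
    by_cases hsp : (c == ' ') = true
    · have hm : post.takeWhile (fun c => !(c == ' ')) = post.takeWhile pvG2 := by
        conv_lhs => rw [← hsplit]
        rw [List.takeWhile_append, if_pos (by rw [hns])]
        rw [beq_iff_eq] at hsp; subst hsp
        simp [List.takeWhile_cons]
      have hallb : (post.takeWhile pvG2).all pvG2 = true := List.all_eq_true.mpr hseg
      simp [hm, hsp, hallb]
    · rw [Bool.not_eq_true] at hsp
      have hm : post.takeWhile (fun c => !(c == ' ')) =
          post.takeWhile pvG2 ++ c :: t.takeWhile (fun c => !(c == ' ')) := by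
        conv_lhs => rw [← hsplit]
        rw [List.takeWhile_append, if_pos (by rw [hns])]
        simp [List.takeWhile_cons, hsp]
      have hallm : (post.takeWhile (fun c => !(c == ' '))).all pvG2 = false := by
        rw [hm]; simp [List.all_append, List.all_cons, hc2]
      simp only [hallm, hsp, Bool.not_false, if_true, ite_true, Bool.false_eq_true, if_false,
        ite_false]

-- ===== VERDICT (by name: the statement is the Claim_ definition above) =====
theorem pv_main (r : List Char) :
    pvALoop r false false =
      (let k := pvScanExp r
       if k = r.length then false
       else
         match r[k]? with
         | none => false
         | some c =>
           if !(c == 'e' || c == 'E') then false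
           else
             let exp := PySem.List.slice r none (some (k : Int))
             let mant := PySem.List.slice r (some ((k : Int) + 1)) none
             let ml := pvScanTok mant
             let m := PySem.List.slice mant none (some (ml : Int))
             if !(m.all fun c => PySem.Chars.isdigit c || c == '.') then false
             else (exp.any PySem.Chars.isdigit || m.any PySem.Chars.isdigit)) := by
  rw [pvALoop_phase1, pvScanExp_eq]
  cases hdw : r.dropWhile pvG1 with
  | nil =>
    have htw : r.takeWhile pvG1 = r := by
      conv_rhs => rw [← List.takeWhile_append_dropWhile (p := pvG1) (l := r)]
      rw [hdw, List.append_nil]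
    simp [htw]
  | cons c t =>
    have hG1c : pvG1 c = false := by
      have w : r.dropWhile pvG1 ≠ [] := by rw [hdw]; simp
      have hh := List.head_dropWhile_not pvG1 w
      simp only [hdw, List.head_cons] at hh
      exact hh
    have hall : ∀ x ∈ r.takeWhile pvG1, pvG1 x = true := fun x hx => List.mem_takeWhile_imp hx
    obtain ⟨seg, hseg⟩ : ∃ seg, r.takeWhile pvG1 = seg := ⟨_, rfl⟩
    rw [hseg] at hall
    have hsplit : seg ++ c :: t = r := by
      rw [← hseg, ← hdw]; exact List.takeWhile_append_dropWhile
    subst hsplit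
    have htwseg : List.takeWhile pvG1 seg = seg := List.takeWhile_eq_self_iff.mpr hall
    have htw : (seg ++ c :: t).takeWhile pvG1 = seg := by
      rw [List.takeWhile_append, if_pos (by rw [htwseg]), List.takeWhile_cons, hG1c]
      simp
    rw [htw]
    have hlen : ¬ seg.length = (seg ++ c :: t).length := by
      rw [List.length_append, List.length_cons]; omega
    have hget : (seg ++ c :: t)[seg.length]? = some c := by
      rw [List.getElem?_append_right (le_refl _)]
      simp
    simp only [if_neg hlen, hget]
    by_cases he : (c == 'e' || c == 'E') = true
    · have hexp : PySem.List.slice (seg ++ c :: t) none (some (seg.length : Int)) = seg := by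
        rw [PySem.List.slice_to_natCast]
        exact List.take_left' rfl
      have hmant : PySem.List.slice (seg ++ c :: t) (some ((seg.length : Int) + 1)) none = t := by
        rw [show ((seg.length : Int) + 1) = ((seg.length + 1 : Nat) : Int) by push_cast; ring]
        rw [PySem.List.slice_from_natCast]
        rw [show seg ++ c :: t = (seg ++ [c]) ++ t by simp]
        exact List.drop_left' (by simp)
      have hm : PySem.List.slice t none (some ((pvScanTok t : Nat) : Int)) =
          t.takeWhile (fun c => !(c == ' ')) := by
        rw [PySem.List.slice_to_natCast, pvScanTok_eq]
        exact pv_take_len_takeWhile _ t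
      simp only [he, Bool.not_true, Bool.false_eq_true, if_false, hexp, hmant, hm]
      rw [pvALoop_phase2_token]
      simp [pvG2, Bool.false_or]
    · rw [Bool.not_eq_true] at he
      simp [he]

theorem ends_in_start_e_notation_py_spec : Claim_equal_ends_in_start_e_notation_py := by
  unfold Claim_equal_ends_in_start_e_notation_py
  intro text _
  unfold Spec_ends_in_start_e_notation_py ends_in_start_e_notation_py
    ends_in_start_e_notation_py_alt
  exact pv_main text.toList.reverse
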